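-- pv_equiv track=rewrite | github.com/hoon99/Algorithm | 프로그래머스/1/133499. 옹알이 （2）/옹알이 （2）.py | solution
-- ===== SOURCE A (Python) =====
-- def solution(babbling):
--     bab = ["aya", "ye", "woo", "ma"]
--
--     def checker(word, n):
--         if word == "":
--             return True
--         for i in range(4):
--             if word.startswith(bab[i]) and i!=n:
--                 if checker(word[len(bab[i]):], i):
--                     return True
--         return False
--
--     answer = 0
--
--     for word in babbling:
--         if(checker(word, 5)):
--             answer += 1
--
--     return answer
-- ===== SOURCE B (Python) =====
-- def solution(babbling):
--     babs = ["aya", "ye", "woo", "ma"]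
--
--     def ok(word):
--         pos, last = 0, -1
--         while pos < len(word):
--             m = next((i for i, b in enumerate(babs) if word.startswith(b, pos)), None)
--             if m is None or m == last:
--                 return False
--             last = m
--             pos += len(babs[m])
--         return True
--
--     return sum(ok(w) for w in babbling)
-- ===== Notes on version B (the rewrite author's own statement) =====
-- stated objective: simpler
-- what changed: The per-word check is rewritten from A's recursive backtracking checker (which tries all four babbles and recurses) into an iterative scanner that keeps a position and the last-used babble index, exploiting that the four babbles start with distinct letters so at most one can match at each position.
import Mathlib
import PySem

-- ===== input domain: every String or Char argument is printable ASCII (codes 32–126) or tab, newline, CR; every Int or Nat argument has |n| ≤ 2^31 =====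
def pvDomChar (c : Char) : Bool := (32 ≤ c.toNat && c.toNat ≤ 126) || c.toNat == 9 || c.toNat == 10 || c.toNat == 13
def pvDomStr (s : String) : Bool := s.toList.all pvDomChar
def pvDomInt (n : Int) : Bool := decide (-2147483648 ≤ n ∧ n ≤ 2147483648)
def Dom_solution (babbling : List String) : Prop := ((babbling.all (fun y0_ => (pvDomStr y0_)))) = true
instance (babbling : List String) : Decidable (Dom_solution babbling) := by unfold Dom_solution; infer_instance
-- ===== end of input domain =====

-- B changes the per-word recursive backtracking check into an iterative prefix scanner; objective: simpler (no recursion), exact same result.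

-- ===== PORT A =====
-- the four babbles, as in A's `bab` list (as char lists; startswith on ASCII = List.isPrefixOf)
def pvBabA : List (List Char) := [['a','y','a'], ['y','e'], ['w','o','o'], ['m','a']]

-- A's recursive `checker(word, n)`: pvCheckerA is the function body, pvLoopA the `for i in range(4)` loop.
mutual
def pvCheckerA (word : List Char) (n : Int) : Bool :=
  if word = [] then true
  else pvLoopA word n 0
termination_by (word.length, 5)
def pvLoopA (word : List Char) (n : Int) (i : Nat) : Bool :=
  if hi : i < 4 then
    if hb : (pvBabA[i]!).isPrefixOf word ∧ (i : Int) ≠ n then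
      if pvCheckerA (word.drop ((pvBabA[i]!).length)) (i : Int) then true
      else pvLoopA word n (i + 1)
    else pvLoopA word n (i + 1)
  else false
termination_by (word.length, 4 - i)
decreasing_by
  · simp_wf
    left
    have hpre := hb.1
    have hle : (pvBabA[i]!).length ≤ word.length := List.IsPrefix.length_le (List.isPrefixOf_iff_prefix.mp hpre)
    have hpos : 0 < (pvBabA[i]!).length := by
      interval_cases i <;> simp [pvBabA]
    simp only [List.getElem!_eq_getElem?_getD] at hle hpos ⊢
    omega
  · simp_wf; omega
  · simp_wf; omega
end

-- A's outer loop: answer += 1 for each word passing checker(word, 5)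
def solution (babbling : List String) : Int :=
  babbling.foldl (fun answer word => if pvCheckerA word.toList 5 then answer + 1 else answer) 0

-- ===== PORT B =====
def pvBabsB : List (List Char) := [['a','y','a'], ['y','e'], ['w','o','o'], ['m','a']]

-- B's `next((i for i, b in enumerate(babs) if word.startswith(b, pos)), None)` on the suffix from pos
def pvFindB (rest : List Char) : Option Nat :=
  (List.range 4).find? (fun i => (pvBabsB[i]!).isPrefixOf rest)

-- facts needed for termination of the scanner
theorem pvFindB_some {rest : List Char} {i : Nat} (h : pvFindB rest = some i) :
    i < 4 ∧ (pvBabsB[i]!).isPrefixOf rest = true := by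
  unfold pvFindB at h
  have hm := List.find?_some h
  have hmem := List.mem_of_find?_eq_some h
  simp [List.mem_range] at hmem
  exact ⟨hmem, hm⟩

-- B's `while pos < len(word)` loop; `rest` is the suffix of word from pos, `last` as in B
def pvScanB (rest : List Char) (last : Int) : Bool :=
  if rest = [] then true
  else
    match hm : pvFindB rest with
    | none => false
    | some i =>
      if (i : Int) = last then false
      else pvScanB (rest.drop ((pvBabsB[i]!).length)) (i : Int)
termination_by rest.length
decreasing_by
  have h := pvFindB_some hm
  have hle : (pvBabsB[i]!).length ≤ rest.length :=
    List.IsPrefix.length_le (List.isPrefixOf_iff_prefix.mp h.2)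
  have hpos : 0 < (pvBabsB[i]!).length := by
    have := h.1; interval_cases i <;> simp [pvBabsB]
  have hne : rest ≠ [] := by assumption
  have hl : 0 < rest.length := List.length_pos_of_ne_nil hne
  simp only [List.length_drop]; omega

-- B's `sum(ok(w) for w in babbling)` (booleans summed as ints)
def solution_alt (babbling : List String) : Int :=
  (babbling.map (fun w => if pvScanB w.toList (-1) then (1 : Int) else 0)).sum

-- ===== PRECONDITION & SPEC =====
def Spec_solution (babbling : List String) (out : Int) : Prop := out = solution_alt babbling
instance (babbling : List String) (out : Int) : Decidable (Spec_solution babbling out) := by unfold Spec_solution; infer_instance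

-- ===== CLAIM (what is proved, stated in full; the proofs are below) =====
def Claim_equal_solution : Prop := ∀ (babbling : List String), Dom_solution babbling → Spec_solution babbling (solution babbling)

-- ===== LEMMAS AND PROOFS =====

-- evaluate B's finder to a chain of prefix tests
theorem pvFindB_eq (word : List Char) :
    pvFindB word =
      (if ['a','y','a'] <+: word then some 0
       else if ['y','e'] <+: word then some 1
       else if ['w','o','o'] <+: word then some 2
       else if ['m','a'] <+: word then some 3
       else none) := by
  unfold pvFindB
  rw [show List.range 4 = [0,1,2,3] from rfl]
  simp only [List.find?, pvBabsB, List.getElem!_eq_getElem?_getD, List.getElem?_cons_zero,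
    List.getElem?_cons_succ, Option.getD_some]
  cases h0 : List.isPrefixOf ['a','y','a'] word <;>
  cases h1 : List.isPrefixOf ['y','e'] word <;>
  cases h2 : List.isPrefixOf ['w','o','o'] word <;>
  cases h3 : List.isPrefixOf ['m','a'] word <;>
    simp_all [← List.isPrefixOf_iff_prefix]

-- a nonempty prefix pins down the word's first character
theorem pvHead {b : Char} {bs word : List Char} (h : (b :: bs) <+: word) :
    word.head? = some b := by
  obtain ⟨t, ht⟩ := h
  subst ht; rfl

-- characterization of A's inner loop in terms of B's finder
theorem pvLoopA_char (word : List Char) (n : Int) :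
    pvLoopA word n 0 =
      (match pvFindB word with
       | none => false
       | some i => if (i : Int) = n then false
                   else pvCheckerA (word.drop ((pvBabA[i]!).length)) (i : Int)) := by
  rw [pvFindB_eq]
  rw [pvLoopA, pvLoopA, pvLoopA, pvLoopA, pvLoopA]
  by_cases h0 : ['a','y','a'] <+: word
  · have e1 : ¬ ['y','e'] <+: word := fun h => by
      have := pvHead h0; have := pvHead h; simp_all
    have e2 : ¬ ['w','o','o'] <+: word := fun h => by
      have := pvHead h0; have := pvHead h; simp_all
    have e3 : ¬ ['m','a'] <+: word := fun h => by
      have := pvHead h0; have := pvHead h; simp_all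
    by_cases hn : (0 : Int) = n <;>
      simp [pvBabA, List.isPrefixOf_iff_prefix, h0, e1, e2, e3, hn]
  · by_cases h1 : ['y','e'] <+: word
    · have e2 : ¬ ['w','o','o'] <+: word := fun h => by
        have := pvHead h1; have := pvHead h; simp_all
      have e3 : ¬ ['m','a'] <+: word := fun h => by
        have := pvHead h1; have := pvHead h; simp_all
      by_cases hn : (1 : Int) = n <;>
        simp [pvBabA, List.isPrefixOf_iff_prefix, h0, h1, e2, e3, hn]
    · by_cases h2 : ['w','o','o'] <+: word
      · have e3 : ¬ ['m','a'] <+: word := fun h => by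
          have := pvHead h2; have := pvHead h; simp_all
        by_cases hn : (2 : Int) = n <;>
          simp [pvBabA, List.isPrefixOf_iff_prefix, h0, h1, h2, e3, hn]
      · by_cases h3 : ['m','a'] <+: word
        · by_cases hn : (3 : Int) = n <;>
            simp [pvBabA, List.isPrefixOf_iff_prefix, h0, h1, h2, h3, hn]
        · simp [pvBabA, List.isPrefixOf_iff_prefix, h0, h1, h2, h3]

-- main per-word equivalence: A's checker equals B's scanner whenever n and last
-- block the same babble indices
theorem pvMain : ∀ (k : Nat) (word : List Char), word.length ≤ k → ∀ (n last : Int),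
    (∀ i : Nat, i < 4 → ((i : Int) = n ↔ (i : Int) = last)) →
    pvCheckerA word n = pvScanB word last := by
  intro k
  induction k with
  | zero =>
    intro word hlen n last _
    have : word = [] := List.eq_nil_of_length_eq_zero (Nat.le_zero.mp hlen)
    subst this
    rw [pvCheckerA, pvScanB]; simp
  | succ k ih =>
    intro word hlen n last hR
    by_cases hw : word = []
    · subst hw; rw [pvCheckerA, pvScanB]; simp
    · rw [pvCheckerA, pvScanB]
      simp only [hw, if_false]
      rw [pvLoopA_char]
      cases hm : pvFindB word with
      | none => simp
      | some i =>
        obtain ⟨hi4, hpre⟩ := pvFindB_some hm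
        have hiff := hR i hi4
        by_cases hn : (i : Int) = n
        · have hl2 : n = last := by rw [← hn]; exact hiff.mp hn
          simp [hn, hl2]
        · have hl : ¬ (i : Int) = last := fun h => hn (hiff.mpr h)
          have hAB : pvBabA = pvBabsB := rfl
          have hdroplen : (word.drop ((pvBabsB[i]!).length)).length ≤ k := by
            have hle : (pvBabsB[i]!).length ≤ word.length :=
              List.IsPrefix.length_le (List.isPrefixOf_iff_prefix.mp hpre)
            have hpos : 0 < (pvBabsB[i]!).length := by
              interval_cases i <;> simp [pvBabsB]
            have hwl : 0 < word.length := List.length_pos_of_ne_nil hw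
            simp only [List.length_drop]; omega
          simp only [hn, hl, if_neg, not_false_iff, hAB]
          exact ih _ hdroplen (i : Int) (i : Int) (fun j _ => Iff.rfl)

-- folding a conditional counter equals summing mapped 0/1s
theorem pvCount (l : List String) (p : String → Bool) : ∀ (c : Int),
    l.foldl (fun answer word => if p word then answer + 1 else answer) c
      = c + (l.map (fun w => if p w then (1 : Int) else 0)).sum := by
  induction l with
  | nil => intro c; simp
  | cons w ws ih =>
    intro c
    simp only [List.foldl, List.map, List.sum_cons]
    rw [ih]
    by_cases hp : p w <;> simp [hp] <;> ring

-- ===== VERDICT (by name: the statement is the Claim_ definition above) =====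
theorem solution_spec : Claim_equal_solution := by
  intro babbling _
  unfold Spec_solution solution solution_alt
  rw [pvCount]
  simp only [zero_add]
  refine congrArg List.sum (List.map_congr_left ?_)
  intro w _
  rw [pvMain w.toList.length w.toList le_rfl 5 (-1) (by intro i hi; interval_cases i <;> simp)]
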